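-- pv_equiv track=rewrite | github.com/ElenaGYankova/SoftUni-Python-Fundamentals-2023 | L10_Text_Processing/10-Exercise/t_10_winning_ticket.py | check_ticket_side
-- ===== SOURCE A (Python) =====
-- def check_ticket_side(ticket_side):
--     uninterrupted_match_length = 0
--     match_symbol = ""
--     for symbol in ticket_side:
--         if symbol != match_symbol:
--             if uninterrupted_match_length >= 6:
--                 break
--             uninterrupted_match_length = 1
--             match_symbol = symbol
--         else:
--             uninterrupted_match_length += 1
--     return uninterrupted_match_length, match_symbol
-- ===== SOURCE B (Python) =====
-- def check_ticket_side(ticket_side):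
--     # Phase 1: run-length encode the string.
--     runs = []
--     i = 0
--     n = len(ticket_side)
--     while i < n:
--         j = i
--         while j < n and ticket_side[j] == ticket_side[i]:
--             j += 1
--         runs.append((ticket_side[i], j - i))
--         i = j
--     # Phase 2: first run of length >= 6, else the last run, else (0, "").
--     result = (0, "")
--     for ch, length in runs:
--         result = (length, ch)
--         if length >= 6:
--             break
--     return result
-- ===== Notes on version B (the rewrite author's own statement) =====
-- stated objective: alternative
-- what changed: A is a single pass with in-loop break-on-run-boundary state machine; B first run-length encodes the string into (symbol, length) runs, then scans the runs for the first one of length >= 6 (else keeps the last).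
import Mathlib
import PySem

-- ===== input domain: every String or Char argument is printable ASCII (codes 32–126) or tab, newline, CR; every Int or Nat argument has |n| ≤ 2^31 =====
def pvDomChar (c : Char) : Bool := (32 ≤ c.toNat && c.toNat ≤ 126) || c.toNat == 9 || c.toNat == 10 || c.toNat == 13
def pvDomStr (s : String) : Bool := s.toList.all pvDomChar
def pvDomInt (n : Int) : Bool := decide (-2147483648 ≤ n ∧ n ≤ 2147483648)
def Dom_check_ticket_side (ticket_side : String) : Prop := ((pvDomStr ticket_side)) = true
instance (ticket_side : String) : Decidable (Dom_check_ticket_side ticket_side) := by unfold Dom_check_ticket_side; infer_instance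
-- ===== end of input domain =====

-- B is an alternative equal-cost decomposition: run-length encode, then scan runs (no speed claim).
-- ===== PORT A =====
-- A: single pass; break when a new symbol arrives after a run of length >= 6.
def pvLoopA : List Char → Int → String → Int × String
  | [], n, m => (n, m)
  | c :: cs, n, m =>
    if String.ofList [c] ≠ m then
      if n ≥ 6 then (n, m)
      else pvLoopA cs 1 (String.ofList [c])
    else
      pvLoopA cs (n + 1) m

def check_ticket_side (ticket_side : String) : Int × String :=
  pvLoopA ticket_side.toList 0 ""

-- ===== PORT B =====
-- B phase 1: run-length encoding (inner while over equal chars = takeWhile/dropWhile).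
def pvRuns : List Char → List (String × Int)
  | [] => []
  | c :: cs =>
    (String.ofList [c], 1 + (cs.takeWhile (· = c)).length) :: pvRuns (cs.dropWhile (· = c))
termination_by l => l.length
decreasing_by
  simp only [List.length_cons]
  exact Nat.lt_succ_of_le (List.length_dropWhile_le _ cs)

-- B phase 2: first run of length ≥ 6, else the last run, else the initial (0, "").
def pvScan : List (String × Int) → Int × String → Int × String
  | [], res => res
  | (s, n) :: rest, _ =>
    if n ≥ 6 then (n, s) else pvScan rest (n, s)

def check_ticket_side_alt (ticket_side : String) : Int × String :=
  pvScan (pvRuns ticket_side.toList) (0, "")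

-- ===== PRECONDITION & SPEC =====
def Spec_check_ticket_side (ticket_side : String) (out : Int × String) : Prop := out = check_ticket_side_alt ticket_side
instance (ticket_side : String) (out : Int × String) : Decidable (Spec_check_ticket_side ticket_side out) := by unfold Spec_check_ticket_side; infer_instance

-- ===== CLAIM (what is proved, stated in full; the proofs are below) =====
def Claim_equal_check_ticket_side : Prop := ∀ (ticket_side : String), Dom_check_ticket_side ticket_side → Spec_check_ticket_side ticket_side (check_ticket_side ticket_side)

-- ===== LEMMAS AND PROOFS =====

theorem pvMkSingle_inj (a b : Char) : (String.ofList [a] = String.ofList [b]) ↔ a = b := by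
  constructor
  · intro h
    have := congrArg String.toList h
    simp only [String.toList_ofList, List.cons.injEq] at this
    exact this.1
  · intro h; rw [h]

theorem pvMkSingle_ne_empty (a : Char) : String.ofList [a] ≠ "" := by
  intro h
  have := congrArg String.toList h
  simp only [String.toList_ofList] at this
  exact List.cons_ne_nil _ _ (this.trans (by simp [String.toList]))

-- consuming one run in A's loop
theorem pvLoopA_run (cs : List Char) : ∀ (c : Char) (n : Int),
    pvLoopA cs n (String.ofList [c]) =
      (match cs.dropWhile (· = c) with
        | [] => (n + (cs.takeWhile (· = c)).length, String.ofList [c])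
        | d :: ds =>
          if n + (cs.takeWhile (· = c)).length ≥ 6
          then (n + (cs.takeWhile (· = c)).length, String.ofList [c])
          else pvLoopA ds 1 (String.ofList [d])) := by
  induction cs with
  | nil => intro c n; simp [pvLoopA]
  | cons e cs ih =>
    intro c n
    by_cases h : e = c
    · subst h
      have hne : ¬ (String.ofList [e] ≠ String.ofList [e]) := by simp
      simp only [pvLoopA, hne, if_false, List.takeWhile, List.dropWhile, decide_true]
      rw [ih e (n + 1)]
      cases hdw : cs.dropWhile (· = e) with
      | nil => simp [List.length_cons]; ring_nf
      | cons d ds =>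
        simp only [List.length_cons]
        have : n + 1 + ((cs.takeWhile (· = e)).length : Int)
            = n + (((cs.takeWhile (· = e)).length : Int) + 1) := by ring
        push_cast
        rw [this]
    · have hne : String.ofList [e] ≠ String.ofList [c] := by
        intro hh; exact h ((pvMkSingle_inj e c).1 hh)
      simp only [pvLoopA, hne, ne_eq, not_false_eq_true, if_true]
      have htw : (e :: cs).takeWhile (· = c) = [] := by simp [List.takeWhile, h]
      have hdw : (e :: cs).dropWhile (· = c) = e :: cs := by simp [List.dropWhile, h]
      rw [htw, hdw]
      simp

theorem pvMain (k : Nat) : ∀ (cs : List Char), cs.length ≤ k →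
    ∀ (c : Char) (res : Int × String),
      pvLoopA cs 1 (String.ofList [c]) = pvScan (pvRuns (c :: cs)) res := by
  induction k with
  | zero =>
    intro cs hcs c res
    have : cs = [] := List.eq_nil_of_length_eq_zero (Nat.le_zero.mp hcs)
    subst this
    simp [pvLoopA, pvRuns, pvScan]
  | succ k ih =>
    intro cs hcs c res
    rw [pvLoopA_run]
    rw [pvRuns]
    cases hdw : cs.dropWhile (· = c) with
    | nil =>
      simp only [pvRuns, pvScan]
      split <;> rfl
    | cons d ds =>
      simp only [pvScan]
      have hlen : ds.length ≤ k := by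
        have h1 : (cs.dropWhile (· = c)).length ≤ cs.length := cs.length_dropWhile_le _
        rw [hdw] at h1
        simp only [List.length_cons] at h1
        omega
      by_cases hge : (1 : Int) + (cs.takeWhile (· = c)).length ≥ 6
      · have : ((1 : Int) + (cs.takeWhile (· = c)).length) ≥ 6 := hge
        simp only [ge_iff_le] at hge ⊢
        rw [if_pos (by omega), if_pos (by omega)]
      · simp only [ge_iff_le] at hge
        rw [if_neg (by omega), if_neg (by omega)]
        exact ih ds hlen d _

-- ===== VERDICT (by name: the statement is the Claim_ definition above) =====
theorem check_ticket_side_spec : Claim_equal_check_ticket_side := by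
  intro s _
  unfold Spec_check_ticket_side check_ticket_side check_ticket_side_alt
  cases h : s.toList with
  | nil => simp [pvLoopA, pvRuns, pvScan]
  | cons c cs =>
    have hne : String.ofList [c] ≠ "" := pvMkSingle_ne_empty c
    simp only [pvLoopA, hne, ne_eq, not_false_eq_true, if_true]
    rw [if_neg (by omega)]
    exact pvMain cs.length cs (le_refl _) c (0, "")
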